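-- pv_equiv track=rewrite | github.com/siwon-park/Problem-Solving | Baekjoon_Solve/Stack/16120/16120.py | is_ppap
-- ===== SOURCE A (Python) =====
-- def is_ppap(s: str) -> str:
--     stack = []  # 스택
--     n = len(s)  # 문자열의 길이
--     size = 0  # 스택 사이즈
--     for i in range(n):
--         w = s[i]  # 단어
--         if not stack:
--             stack.append(w)
--             size += 1
--         else:
--             stack.append(w)
--             size += 1
--             while size >= 4:  # 스택의 길이가 4이상이면
--                 words = stack[-4] + stack[-3] + stack[-2] + stack[-1]  # 스택의 맨 위 4개의 문자열
--                 if words == "PPAP":  # 4개 연속된 문자열으 PPAP이면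
--                     for _ in range(4):  # 4개를 스택에서 뽑은 다음에
--                         stack.pop()
--                         size -= 1
--                     stack.append("P")  # "P"를 삽입함
--                     size += 1
--                 else:  # 무한 루프 방지를 위한 break문
--                     break
--
--     if stack == ["P"]:  # 스택에 마지막에 남아있는 문자열이 "P" 하나 뿐이면 PPAP 문자열이다
--         return "PPAP"
--     return "NP"
-- ===== SOURCE B (Python) =====
-- def is_ppap(s: str) -> str:
--     prev = None
--     while prev != s:
--         prev = s
--         s = s.replace("PPAP", "P")
--     return "PPAP" if s == "P" else "NP"
-- ===== Notes on version B (the rewrite author's own statement) =====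
-- stated objective: simpler
-- what changed: Replaces the explicit stack/size single left-to-right pass by repeatedly applying the global string rewrite PPAP->P until a fixpoint and testing whether the fixpoint is the single letter P (same unique normal form since the rewrite is terminating and confluent).
import Mathlib
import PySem

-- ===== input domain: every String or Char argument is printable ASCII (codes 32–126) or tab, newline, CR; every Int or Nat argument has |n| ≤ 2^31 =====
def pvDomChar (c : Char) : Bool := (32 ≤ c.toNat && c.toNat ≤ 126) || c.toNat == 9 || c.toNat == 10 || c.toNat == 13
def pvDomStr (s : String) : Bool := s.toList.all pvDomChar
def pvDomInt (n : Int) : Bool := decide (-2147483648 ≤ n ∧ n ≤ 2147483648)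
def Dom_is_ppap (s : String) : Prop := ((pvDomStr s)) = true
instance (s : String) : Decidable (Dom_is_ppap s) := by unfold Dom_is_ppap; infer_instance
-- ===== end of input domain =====

-- B replaces A's explicit character stack by iterating the global rewrite "PPAP"->"P" to a fixpoint (simpler; return value only, no side effects involved).

-- ===== PORT A =====
-- A-side helper: the inner `while size >= 4:` loop (pop 4, push "P" while the top four read "PPAP")
def ppapWhile (stack : List Char) (size : Int) : List Char × Int :=
  if 4 ≤ size then
    let words := [PySem.List.pyGetD stack (-4) ' ', PySem.List.pyGetD stack (-3) ' ',
                  PySem.List.pyGetD stack (-2) ' ', PySem.List.pyGetD stack (-1) ' ']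
    if words = ['P', 'P', 'A', 'P'] then
      -- four `stack.pop()` / `size -= 1`, then append "P" / `size += 1`
      ppapWhile (stack.dropLast.dropLast.dropLast.dropLast ++ ['P']) (size - 4 + 1)
    else (stack, size)
  else (stack, size)
termination_by size.toNat
decreasing_by omega

-- A-side helper: the body of `for i in range(n):` (w is already the fetched character s[i])
def ppapBody (acc : List Char × Int) (w : Char) : List Char × Int :=
  if acc.1 = [] then (acc.1 ++ [w], acc.2 + 1)
  else ppapWhile (acc.1 ++ [w], acc.2 + 1).1 (acc.1 ++ [w], acc.2 + 1).2

def is_ppap (s : String) : String :=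
  let n := PySem.Str.len s
  let res := (PySem.List.pyRange 0 n 1).foldl
    (fun acc i => ppapBody acc (PySem.List.pyGetD s.toList i ' '))  -- w = s[i], i ∈ range(n) is always in range
    ([], 0)
  if res.1 = ['P'] then "PPAP" else "NP"

-- ===== PORT B =====
-- B-side helper (proof-carrying termination for the while loop): one global replace pass, as a function on char lists
def ppapR (l : List Char) : List Char :=
  match l with
  | [] => []
  | c :: t =>
    if ['P','P','A','P'].isPrefixOf (c :: t) then 'P' :: ppapR (t.drop 3) else c :: ppapR t
termination_by l.length
decreasing_by
  all_goals (simp; try omega)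

theorem ppap_prefix_shape {c : Char} {t : List Char}
    (h : ['P','P','A','P'].isPrefixOf (c :: t) = true) :
    c = 'P' ∧ t = 'P' :: 'A' :: 'P' :: t.drop 3 := by
  obtain ⟨r, hr⟩ := List.isPrefixOf_iff_prefix.mp h
  simp only [List.cons_append, List.nil_append] at hr
  injection hr with h1 h2
  subst h2
  exact ⟨h1.symm, by simp⟩

theorem ppapR_length_le (l : List Char) : (ppapR l).length ≤ l.length := by
  induction l using ppapR.induct with
  | case1 => simp [ppapR]
  | case2 c t h ih =>
    obtain ⟨hc, ht⟩ := ppap_prefix_shape h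
    rw [ppapR]; simp only [h, if_pos]
    have h3 : (t.drop 3).length = t.length - 3 := by simp
    have h3' : 3 ≤ t.length := by rw [ht]; simp
    simp only [List.length_cons]; omega
  | case3 c t h ih =>
    rw [ppapR]
    simp only [Bool.not_eq_true] at h
    simp only [h, Bool.false_eq_true, if_false, List.length_cons]
    omega

theorem ppapR_ne_lt (l : List Char) (h : ppapR l ≠ l) : (ppapR l).length < l.length := by
  induction l using ppapR.induct with
  | case1 => simp [ppapR] at h
  | case2 c t hp ih =>
    obtain ⟨hc, ht⟩ := ppap_prefix_shape hp
    rw [ppapR]; simp only [hp, if_pos]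
    have := ppapR_length_le (t.drop 3)
    have h3 : (t.drop 3).length = t.length - 3 := by simp
    have h3' : 3 ≤ t.length := by rw [ht]; simp
    simp only [List.length_cons]; omega
  | case3 c t hp ih =>
    rw [ppapR] at h ⊢
    simp only [Bool.not_eq_true] at hp
    simp only [hp, Bool.false_eq_true, if_false] at h ⊢
    have hne : ppapR t ≠ t := by intro he; exact h (by rw [he])
    have := ih hne
    simp only [List.length_cons]; omega

theorem go_eq_ppapR (fuel : Nat) (l acc : List Char) (h : l.length ≤ fuel) :
    PySem.Chars.replace.go ['P','P','A','P'] ['P'] fuel l acc = acc.reverse ++ ppapR l := by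
  induction fuel generalizing l acc with
  | zero =>
    have : l = [] := by cases l <;> simp_all
    subst this
    rw [PySem.Chars.replace.go.eq_def]; simp [ppapR]
  | succ fuel ih =>
    cases l with
    | nil => rw [PySem.Chars.replace.go.eq_def]; simp [ppapR]
    | cons c t =>
      rw [PySem.Chars.replace.go.eq_def]
      by_cases hp : ['P','P','A','P'].isPrefixOf (c :: t) = true
      · obtain ⟨hc, ht⟩ := ppap_prefix_shape hp
        have h3 : 3 ≤ t.length := by rw [ht]; simp
        simp only [hp, if_pos]
        have hdrop : List.drop (['P','P','A','P'] : List Char).length (c :: t) = t.drop 3 := by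
          simp
        rw [hdrop, ih (t.drop 3) _ (by simp at h ⊢; omega)]
        rw [ppapR]; simp [hp]
      · simp only [hp, Bool.false_eq_true, if_false]
        rw [ih t (c :: acc) (by simp at h ⊢; omega)]
        rw [ppapR]; simp [hp]

theorem toList_replace_eq_ppapR (s : String) :
    (PySem.Str.replace s "PPAP" "P").toList = ppapR s.toList := by
  rw [PySem.Str.toList_replace]
  have h1 : ("PPAP" : String).toList = ['P','P','A','P'] := rfl
  have h2 : ("P" : String).toList = ['P'] := rfl
  rw [h1, h2, PySem.Chars.replace]
  simp only [List.isEmpty_cons, if_false, Bool.false_eq_true]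
  exact go_eq_ppapR s.toList.length s.toList [] le_rfl

-- B-side loop: `prev = None; while prev != s: prev = s; s = s.replace("PPAP", "P")`
def ppapFix (s : String) : String :=
  let t := PySem.Str.replace s "PPAP" "P"
  if h : t = s then s else ppapFix t
termination_by s.toList.length
decreasing_by
  have ht := toList_replace_eq_ppapR s
  have hne : (PySem.Str.replace s "PPAP" "P").toList ≠ s.toList := fun hc => h (String.toList_inj.mp hc)
  rw [ht] at hne ⊢
  exact ppapR_ne_lt _ hne

def is_ppap_alt (s : String) : String :=
  let r := ppapFix s
  if r = "P" then "PPAP" else "NP"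

-- ===== PRECONDITION & SPEC =====
def Spec_is_ppap (s : String) (out : String) : Prop := out = is_ppap_alt s
instance (s : String) (out : String) : Decidable (Spec_is_ppap s out) := by unfold Spec_is_ppap; infer_instance

-- ===== CLAIM (what is proved, stated in full; the proofs are below) =====
def Claim_equal_is_ppap : Prop := ∀ (s : String), Dom_is_ppap s → Spec_is_ppap s (is_ppap s)

-- ===== LEMMAS AND PROOFS =====

-- The one-step stack transition, kept in REVERSED order (top of stack = head); 'A','P','P' at the
-- head of the reversed stack means the stack top reads "PPA", so pushing 'P' completes "PPAP".
def stepP (st : List Char) (c : Char) : List Char :=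
  if c = 'P' ∧ st.take 3 = ['A','P','P'] then 'P' :: st.drop 3 else c :: st

-- reversed-stack irreducibility: the (forward) stack contains no "PPAP"
def IrrR (st : List Char) : Prop := ¬ (['P','A','P','P'] <:+: st)

theorem stepP_eq_cons (st : List Char) (c : Char)
    (h : ¬ (c = 'P' ∧ st.take 3 = ['A','P','P'])) : stepP st c = c :: st := by
  unfold stepP; rw [if_neg h]

theorem stepP_P_head (st : List Char) : ∃ u : List Char, stepP st 'P' = 'P' :: u := by
  unfold stepP; split_ifs <;> exact ⟨_, rfl⟩

theorem keyPPAP (st : List Char) : List.foldl stepP st ['P','P','A','P'] = stepP st 'P' := by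
  simp only [List.foldl_cons, List.foldl_nil]
  obtain ⟨u, hu⟩ := stepP_P_head st
  rw [hu]
  have h2 : stepP ('P' :: u) 'P' = 'P' :: 'P' :: u := by
    apply stepP_eq_cons
    rintro ⟨-, h⟩
    rw [List.take_succ_cons] at h
    exact absurd (List.head_eq_of_cons_eq h) (by decide)
  have h3 : stepP ('P' :: 'P' :: u) 'A' = 'A' :: 'P' :: 'P' :: u := by
    apply stepP_eq_cons
    rintro ⟨h, -⟩
    exact absurd h (by decide)
  have h4 : stepP ('A' :: 'P' :: 'P' :: u) 'P' = 'P' :: u := by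
    unfold stepP
    rw [if_pos ⟨rfl, by simp⟩]
    simp
  rw [h2, h3, h4]

theorem pushR (l : List Char) : ∀ st : List Char,
    List.foldl stepP st (ppapR l) = List.foldl stepP st l := by
  induction l using ppapR.induct with
  | case1 => intro st; simp [ppapR]
  | case2 c t hp ih =>
    intro st
    obtain ⟨hc, ht⟩ := ppap_prefix_shape hp
    rw [ppapR]; simp only [hp, if_pos]
    rw [List.foldl_cons, ih]
    conv_rhs => rw [hc, ht]
    have : ('P' :: 'P' :: 'A' :: 'P' :: t.drop 3 : List Char)
        = ['P','P','A','P'] ++ t.drop 3 := by simp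
    rw [this, List.foldl_append, keyPPAP]
  | case3 c t hp ih =>
    intro st
    rw [ppapR]
    simp only [Bool.not_eq_true] at hp
    simp only [hp, Bool.false_eq_true, if_false]
    rw [List.foldl_cons, List.foldl_cons, ih]

theorem noInfix_foldl (l : List Char) (h : ¬ (['P','P','A','P'] <:+: l)) :
    List.foldl stepP [] l = l.reverse := by
  induction l using List.reverseRecOn with
  | nil => simp
  | append_singleton u c ih =>
    have hu : ¬ (['P','P','A','P'] <:+: u) := by
      intro hc; exact h (hc.trans ⟨[], [c], by simp⟩)
    rw [List.foldl_append, List.foldl_cons, List.foldl_nil, ih hu]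
    rw [List.reverse_append]
    unfold stepP
    split_ifs with hc
    · exfalso
      rcases hc with ⟨hcP, htake⟩
      have hrev : u.reverse = ['A','P','P'] ++ u.reverse.drop 3 := by
        conv_lhs => rw [← List.take_append_drop 3 u.reverse, htake]
      have hueq : u = (u.reverse.drop 3).reverse ++ ['P','P','A'] := by
        have := congrArg List.reverse hrev
        simpa using this
      apply h
      exact ⟨(u.reverse.drop 3).reverse, [], by rw [hueq, hcP]; simp⟩
    · simp

theorem ppapR_infix_lt (l : List Char) (h : ['P','P','A','P'] <:+: l) :
    (ppapR l).length < l.length := by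
  induction l using ppapR.induct with
  | case1 => exact absurd (List.eq_nil_of_infix_nil h) (by decide)
  | case2 c t hp ih =>
    obtain ⟨hc, ht⟩ := ppap_prefix_shape hp
    rw [ppapR]; simp only [hp, if_pos]
    have := ppapR_length_le (t.drop 3)
    have h3 : (t.drop 3).length = t.length - 3 := by simp
    have h3' : 3 ≤ t.length := by rw [ht]; simp
    simp only [List.length_cons]; omega
  | case3 c t hp ih =>
    rw [ppapR]
    simp only [Bool.not_eq_true] at hp
    simp only [hp, Bool.false_eq_true, if_false]
    have hinf : ['P','P','A','P'] <:+: t := by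
      rcases List.infix_cons_iff.mp h with hpre | hinf
      · exact absurd (List.isPrefixOf_iff_prefix.mpr hpre) (by simp [hp])
      · exact hinf
    have := ih hinf
    simp only [List.length_cons]; omega

theorem ppapFix_foldl (s : String) :
    List.foldl stepP [] (ppapFix s).toList = List.foldl stepP [] s.toList ∧
    ppapR (ppapFix s).toList = (ppapFix s).toList := by
  induction s using ppapFix.induct with
  | case1 x t h =>
    have h' : PySem.Str.replace x "PPAP" "P" = x := h
    rw [ppapFix]
    simp only [h', dif_pos]
    refine ⟨trivial, ?_⟩
    have := toList_replace_eq_ppapR x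
    rw [h'] at this
    exact this.symm
  | case2 x t h ih =>
    have h' : ¬ PySem.Str.replace x "PPAP" "P" = x := h
    rw [ppapFix]
    simp only [h', dif_neg, not_false_iff]
    refine ⟨?_, ih.2⟩
    rw [ih.1, toList_replace_eq_ppapR, pushR]

theorem pyGetD_last4 (w : List Char) (a b c d x : Char) :
    [PySem.List.pyGetD (w ++ [a,b,c,d]) (-4) x, PySem.List.pyGetD (w ++ [a,b,c,d]) (-3) x,
     PySem.List.pyGetD (w ++ [a,b,c,d]) (-2) x, PySem.List.pyGetD (w ++ [a,b,c,d]) (-1) x]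
    = [a,b,c,d] := by
  have hl : (w ++ [a,b,c,d]).length = w.length + 4 := by simp
  rw [PySem.List.pyGetD_neg_ofNat _ 4 _ (by omega) (by omega),
      PySem.List.pyGetD_neg_ofNat _ 3 _ (by omega) (by omega),
      PySem.List.pyGetD_neg_ofNat _ 2 _ (by omega) (by omega),
      PySem.List.pyGetD_neg_ofNat _ 1 _ (by omega) (by omega)]
  simp only [hl]
  have e : ∀ (j : Nat) (_ : j < 4), (w ++ [a,b,c,d])[w.length + j]'(by simp; omega) = [a,b,c,d][j] := by
    intro j hj
    rw [List.getElem_append_right (by omega)]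
    congr 1
    omega
  simp only [show w.length + 4 - 4 = w.length + 0 from by omega,
      show w.length + 4 - 3 = w.length + 1 from by omega,
      show w.length + 4 - 2 = w.length + 2 from by omega,
      show w.length + 4 - 1 = w.length + 3 from by omega]
  rw [e 0 (by omega), e 1 (by omega), e 2 (by omega), e 3 (by omega)]
  simp

theorem dropLast4_append (w : List Char) (a b c d : Char) :
    ((((w ++ [a,b,c,d]).dropLast).dropLast).dropLast).dropLast = w := by
  have h1 : w ++ [a,b,c,d] = ((w ++ [a] ++ [b]) ++ [c]) ++ [d] := by simp
  rw [h1, List.dropLast_concat, List.dropLast_concat, List.dropLast_concat, List.dropLast_concat]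

theorem ppapWhile_small (stack : List Char) (size : Int) (h : ¬ 4 ≤ size) :
    ppapWhile stack size = (stack, size) := by
  rw [ppapWhile]; simp [h]

theorem ppapWhile_no (w : List Char) (a b c d : Char) (size : Int) (h4 : 4 ≤ size)
    (hne : ([a,b,c,d] : List Char) ≠ ['P','P','A','P']) :
    ppapWhile (w ++ [a,b,c,d]) size = (w ++ [a,b,c,d], size) := by
  rw [ppapWhile]
  simp only [h4, if_pos, pyGetD_last4]
  rw [if_neg hne]

theorem ppapWhile_red (w : List Char) (size : Int) (h4 : 4 ≤ size) :
    ppapWhile (w ++ ['P','P','A','P']) size = ppapWhile (w ++ ['P']) (size - 4 + 1) := by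
  rw [ppapWhile]
  simp only [h4, if_pos, pyGetD_last4, dropLast4_append]

theorem IrrR_nil : IrrR [] := by
  intro h
  simpa using h.length_le

theorem IrrR_short (st : List Char) (h : st.length ≤ 3) : IrrR st := by
  intro hinf
  have := hinf.length_le
  simp at this
  omega

theorem body_step (st : List Char) (c : Char) (hIrr : IrrR st) :
    ppapBody (st.reverse, (st.length : Int)) c = ((stepP st c).reverse, ((stepP st c).length : Int))
      ∧ IrrR (stepP st c) := by
  by_cases hst : st = []
  · subst hst
    unfold ppapBody
    have hstep : stepP [] c = [c] := stepP_eq_cons [] c (by rintro ⟨-, h⟩; simp at h)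
    rw [hstep]
    refine ⟨by simp, IrrR_short [c] (by simp)⟩
  · unfold ppapBody
    rw [if_neg (by simpa using hst : ¬ st.reverse = [])]
    by_cases h3 : 3 ≤ st.length
    · obtain ⟨a, b, c2, ht3⟩ := List.length_eq_three.mp
        (show (st.take 3).length = 3 by rw [List.length_take]; omega)
      have hst3 : st = [a, b, c2] ++ st.drop 3 := by
        conv_lhs => rw [← List.take_append_drop 3 st, ht3]
      set u := st.drop 3 with hu
      have hstack : st.reverse ++ [c] = u.reverse ++ [c2, b, a, c] := by
        conv_lhs => rw [hst3]
        simp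
      have husuf : u <:+: st := ⟨[a, b, c2], [], by simp [← hst3]⟩
      by_cases hred : c = 'P' ∧ st.take 3 = ['A','P','P']
      · -- the top of the stack reads "PPAP": one pop-4/push-P round, then the while loop stops
        obtain ⟨hcP, htake⟩ := hred
        have ha : a = 'A' ∧ b = 'P' ∧ c2 = 'P' := by
          rw [ht3] at htake
          injection htake with e1 e2; injection e2 with e2 e3; injection e3 with e3 _
          exact ⟨e1, e2, e3⟩
        obtain ⟨haA, hbP, hc2P⟩ := ha
        subst haA; subst hbP; subst hc2P; subst hcP
        rw [hstack, ppapWhile_red _ _ (by omega)]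
        have hnotu : ¬ ∃ v, u = 'A' :: 'P' :: 'P' :: v := by
          rintro ⟨v, hv⟩
          exact hIrr ⟨['A','P'], v, by rw [hst3, hv]; simp⟩
        have hstop : ppapWhile (u.reverse ++ ['P']) ((st.length : Int) + 1 - 4 + 1)
            = (u.reverse ++ ['P'], (st.length : Int) + 1 - 4 + 1) := by
          by_cases h4u : 4 ≤ (st.length : Int) + 1 - 4 + 1
          · have h3u : 3 ≤ u.length := by
              have : st.length = u.length + 3 := by rw [hst3]; simp
              omega
            obtain ⟨a2, b2, c3, ht3u⟩ := List.length_eq_three.mp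
              (show (u.take 3).length = 3 by rw [List.length_take]; omega)
            have hu3 : u = [a2, b2, c3] ++ u.drop 3 := by
              conv_lhs => rw [← List.take_append_drop 3 u, ht3u]
            have hstacku : u.reverse ++ ['P'] = (u.drop 3).reverse ++ [c3, b2, a2, 'P'] := by
              conv_lhs => rw [hu3]; simp
            have hne' : ([c3, b2, a2, 'P'] : List Char) ≠ ['P','P','A','P'] := by
              intro he
              injection he with e1 e2; injection e2 with e2 e3; injection e3 with e3 _
              exact hnotu ⟨List.drop 3 u, by rw [e1, e2, e3] at hu3; exact hu3⟩
            rw [hstacku, ppapWhile_no _ _ _ _ _ _ h4u hne', ← hstacku]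
          · exact ppapWhile_small _ _ h4u
        rw [hstop]
        have hstepP : stepP st 'P' = 'P' :: u := by
          unfold stepP; rw [if_pos ⟨rfl, htake⟩]
        rw [hstepP]
        have hlen : st.length = u.length + 3 := by rw [hst3]; simp
        constructor
        · simp only [Prod.mk.injEq, List.reverse_cons, List.length_cons]
          exact ⟨trivial, by omega⟩
        -- IrrR ('P' :: u)
        intro hinf
        rcases List.infix_cons_iff.mp hinf with hpre | hinf'
        · obtain ⟨r, hr⟩ := hpre
          simp only [List.cons_append, List.nil_append] at hr
          injection hr with _ h2
          exact hnotu ⟨r, h2.symm⟩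
        · exact hIrr (hinf'.trans husuf)
      · -- no reduction: the while loop stops immediately
        have hne4 : ([c2, b, a, c] : List Char) ≠ ['P','P','A','P'] := by
          intro he
          injection he with e1 e2; injection e2 with e2 e3; injection e3 with e3 e4
          injection e4 with e4 _
          exact hred ⟨e4, by rw [ht3, e1, e2, e3]⟩
        rw [hstack, ppapWhile_no _ _ _ _ _ _ (by omega) hne4, ← hstack]
        have hstepP : stepP st c = c :: st := stepP_eq_cons _ _ hred
        rw [hstepP]
        refine ⟨by simp, ?_⟩
        intro hinf
        rcases List.infix_cons_iff.mp hinf with hpre | hinf'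
        · obtain ⟨r, hr⟩ := hpre
          simp only [List.cons_append, List.nil_append] at hr
          injection hr with e1 e2
          refine hred ⟨e1.symm, ?_⟩
          rw [← e2]; rfl
        · exact hIrr hinf'
    · -- stack shorter than 3: size + 1 < 4, while loop does not run
      rw [ppapWhile_small _ _ (by omega)]
      have hstepP : stepP st c = c :: st := by
        apply stepP_eq_cons
        rintro ⟨-, htake⟩
        have : (st.take 3).length = 3 := by rw [htake]; rfl
        simp [List.length_take] at this
        omega
      rw [hstepP]
      exact ⟨by simp, IrrR_short _ (by simp; omega)⟩

theorem aFold (l : List Char) : ∀ st : List Char, IrrR st →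
    List.foldl ppapBody (st.reverse, (st.length : Int)) l
      = ((List.foldl stepP st l).reverse, ((List.foldl stepP st l).length : Int))
    ∧ IrrR (List.foldl stepP st l) := by
  induction l with
  | nil => intro st h; exact ⟨rfl, h⟩
  | cons c t ih =>
    intro st h
    rw [List.foldl_cons, (body_step st c h).1, List.foldl_cons]
    exact ih (stepP st c) (body_step st c h).2

-- ===== VERDICT (by name: the statement is the Claim_ definition above) =====
theorem is_ppap_spec : Claim_equal_is_ppap := by
  intro s _
  unfold Spec_is_ppap
  show is_ppap s = is_ppap_alt s
  unfold is_ppap is_ppap_alt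
  simp only [PySem.Str.len_eq]
  simp only [PySem.List.foldl_pyRange_zero_pyGetD' s.toList ' ' ppapBody ([], 0)]
  have hA := aFold s.toList [] IrrR_nil
  simp only [List.reverse_nil, List.length_nil, Nat.cast_zero] at hA
  simp only [hA.1]
  have hB := ppapFix_foldl s
  have hfix : ¬ (['P','P','A','P'] <:+: (ppapFix s).toList) := by
    intro hinf
    have hlt := ppapR_infix_lt _ hinf
    rw [hB.2] at hlt
    exact lt_irrefl _ hlt
  have hx : (List.foldl stepP [] s.toList).reverse = (ppapFix s).toList := by
    rw [← hB.1, noInfix_foldl _ hfix, List.reverse_reverse]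
  by_cases hc : ppapFix s = "P"
  · rw [if_pos (by rw [hx, hc]; rfl), if_pos hc]
  · rw [if_neg (fun he => hc (String.toList_inj.mp (by rw [← hx]; exact he))), if_neg hc]
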